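-- pv_equiv track=rewrite | github.com/NUSBF/JsCoFE | pycofe/proc/mtz.py | extract_blocks
-- ===== SOURCE A (Python) =====
-- def extract_blocks(label_list, ctype_list, block_str):
--     block_len = len(block_str)
--     block_rep = list(block_len* ' ')
--     block_end = 0
--     block_list = list()
--     while True:
--         ctype_str = ''.join(ctype_list)
--         block_start = ctype_str.find(block_str, block_end)
--         if block_start < 0:
--             break
--
--         block_end = block_start + block_len
--         ctype_list[block_start:block_end] = block_rep
--         block = tuple(label_list[block_start:block_end])
--         block_list.append(block)
--
--     return block_list
-- ===== SOURCE B (Python) =====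
-- def extract_blocks(label_list, ctype_list, block_str):
--     # One pass over the joined column-type string: successive non-overlapping
--     # finds.  Does not mutate its arguments; the equivalence claimed is about
--     # the return value only.
--     type_str = ''.join(ctype_list)
--     n = len(block_str)
--     blocks = []
--     pos = type_str.find(block_str)
--     while pos >= 0:
--         blocks.append(tuple(label_list[pos:pos + n]))
--         pos = type_str.find(block_str, pos + n)
--     return blocks
-- ===== Notes on version B (the rewrite author's own statement) =====
-- stated objective: simpler
-- what changed: B joins the type list once and walks the fixed string with successive non-overlapping finds, with no per-iteration rejoin and no list splicing; Pre_ excludes an empty block_str (A loops forever) and inputs where block_str occurs in the joined types while some ctype_list entry is not a single character, on which A's use of a string-find index as a list-splice index is an accidental conflation of string and list positions; A blanks ctype_list in place, B does not mutate its arguments (return value only).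
-- outside the precondition, e.g. on extract_blocks(['a'], ['XX'], 'X'): A returns [('a',)], B returns [('a',), ()]
import Mathlib
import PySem

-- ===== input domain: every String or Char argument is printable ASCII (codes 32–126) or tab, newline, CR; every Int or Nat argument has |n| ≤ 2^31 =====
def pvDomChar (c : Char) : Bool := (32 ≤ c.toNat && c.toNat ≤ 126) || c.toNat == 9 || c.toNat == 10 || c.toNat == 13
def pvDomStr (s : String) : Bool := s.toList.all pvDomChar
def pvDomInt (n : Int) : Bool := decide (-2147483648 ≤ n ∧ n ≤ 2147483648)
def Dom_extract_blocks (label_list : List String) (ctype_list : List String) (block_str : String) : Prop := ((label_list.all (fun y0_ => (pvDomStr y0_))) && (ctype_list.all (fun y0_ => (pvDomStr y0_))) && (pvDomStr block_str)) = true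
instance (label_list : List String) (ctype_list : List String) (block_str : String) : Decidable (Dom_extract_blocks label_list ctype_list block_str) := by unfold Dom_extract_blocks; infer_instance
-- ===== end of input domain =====

-- B joins the type list once and walks the fixed string with successive non-overlapping finds
-- (no per-iteration rejoin, no list splicing).  A blanks ctype_list in place, B does not mutate
-- its arguments: the equivalence claimed is about the RETURN value only.
-- Both 'while True' loops are ported with the same fuel, len(join)+len(ctype_list)+1, which
-- outlasts the loop on every input admitted by Pre_ (each iteration advances by ≥ 1).

-- ===== PORT A =====
def extractBlocksLoopA (label_list : List String) (block_str : String) (block_len : Nat) (block_rep : List String) :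
    Nat → List String → Int → List (List String) → List (List String)
  | 0, _, _, block_list => block_list
  | fuel + 1, ctype_list, block_end, block_list =>
    let ctype_str := (PySem.Str.join "" ctype_list).toList
    let block_start := PySem.Chars.findFrom ctype_str block_str.toList block_end
    if block_start < 0 then block_list
    else
      let block_end' := block_start + (block_len : Int)
      let ctype_list' := PySem.List.slice ctype_list none (some block_start) ++ block_rep ++
        PySem.List.slice ctype_list (some block_end') none
      let block := PySem.List.slice label_list (some block_start) (some block_end')
      extractBlocksLoopA label_list block_str block_len block_rep fuel ctype_list' block_end' (block_list ++ [block])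

def extract_blocks (label_list : List String) (ctype_list : List String) (block_str : String) : List (List String) :=
  let block_len := block_str.toList.length           -- len(block_str)
  let block_rep := List.replicate block_len " "      -- list(block_len * ' ')
  let fuel := (PySem.Str.join "" ctype_list).toList.length + ctype_list.length + 1
  extractBlocksLoopA label_list block_str block_len block_rep fuel ctype_list 0 []

-- ===== PORT B =====
-- state: the scan position pos (the last find's result); the joined string is fixed
def extractBlocksLoopB (label_list : List String) (type_str : List Char) (block_str : String) (n : Nat) :
    Nat → Int → List (List String) → List (List String)
  | 0, _, blocks => blocks
  | fuel + 1, pos, blocks =>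
    if 0 ≤ pos then
      let blocks' := blocks ++ [PySem.List.slice label_list (some pos) (some (pos + (n : Int)))]
      extractBlocksLoopB label_list type_str block_str n fuel
        (PySem.Chars.findFrom type_str block_str.toList (pos + (n : Int))) blocks'
    else blocks

def extract_blocks_alt (label_list : List String) (ctype_list : List String) (block_str : String) : List (List String) :=
  let type_str := (PySem.Str.join "" ctype_list).toList
  let n := block_str.toList.length
  let fuel := type_str.length + ctype_list.length + 1
  extractBlocksLoopB label_list type_str block_str n fuel (PySem.Chars.find type_str block_str.toList) []

-- ===== PRECONDITION & SPEC =====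
-- Pre_ excludes an empty block_str (A loops forever there) and inputs where block_str occurs in
-- the joined types while some ctype_list entry is not a single character: there A's use of a
-- string-find index as a list-splice index is an accidental conflation of string and list positions.
def Pre_extract_blocks (label_list : List String) (ctype_list : List String) (block_str : String) : Prop :=
  block_str.toList ≠ [] ∧
    ((∀ c ∈ ctype_list, c.toList.length = 1) ∨
      ¬ block_str.toList <:+: (PySem.Str.join "" ctype_list).toList)
instance (label_list : List String) (ctype_list : List String) (block_str : String) : Decidable (Pre_extract_blocks label_list ctype_list block_str) := by unfold Pre_extract_blocks; infer_instance

def pvWitness_extract_blocks : List String × List String × String := (["a", "b"], ["H", "F"], "F")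

def Spec_extract_blocks (label_list : List String) (ctype_list : List String) (block_str : String) (out : List (List String)) : Prop := out = extract_blocks_alt label_list ctype_list block_str
instance (label_list : List String) (ctype_list : List String) (block_str : String) (out : List (List String)) : Decidable (Spec_extract_blocks label_list ctype_list block_str out) := by unfold Spec_extract_blocks; infer_instance

-- ===== CLAIM (what is proved, stated in full; the proofs are below) =====
def Claim_equal_extract_blocks : Prop := ∀ (label_list : List String) (ctype_list : List String) (block_str : String), Dom_extract_blocks label_list ctype_list block_str → Pre_extract_blocks label_list ctype_list block_str → Spec_extract_blocks label_list ctype_list block_str (extract_blocks label_list ctype_list block_str)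

-- ===== LEMMAS AND PROOFS =====

-- ''.join over a list of strings, on the character level, is flatten
lemma join_empty_flatten (ps : List (List Char)) : PySem.Chars.join [] ps = ps.flatten := by
  induction ps with
  | nil => simp [PySem.Chars.join_nil]
  | cons p rest ih =>
    cases rest with
    | nil => simp [PySem.Chars.join, List.intercalate]
    | cons q rest' => rw [PySem.Chars.join_cons_cons]; simp_all

lemma joinChars (cl : List String) :
    (PySem.Str.join "" cl).toList = (cl.map String.toList).flatten := by
  have h : ("" : String).toList = [] := rfl
  rw [PySem.Str.toList_join, h, join_empty_flatten]

-- a list of single-character strings is, entry for entry, its own flattening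
lemma singletons_eq (ps : List (List Char)) (h : ∀ x ∈ ps, x.length = 1) :
    ps = ps.flatten.map (fun c => [c]) := by
  induction ps with
  | nil => rfl
  | cons p rest ih =>
    have hp : p.length = 1 := h p (by simp)
    obtain ⟨c, rfl⟩ : ∃ c, p = [c] := by
      cases p with
      | nil => simp at hp
      | cons c t => cases t with
        | nil => exact ⟨c, rfl⟩
        | cons _ _ => simp at hp
    simpa using ih (fun x hx => h x (by simp [hx]))

lemma flatten_map_single (l : List Char) : (l.map (fun c => [c])).flatten = l := by
  induction l with
  | nil => rfl
  | cons c t ih => simp [ih]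

-- the loop invariant: A's current joined string has the same length as B's fixed string and
-- agrees with it from the scan position on, so both loops find the same index at every step
lemma drop_len_append (a b : List Char) (n : Nat) (h : a.length = n) :
    (a ++ b).drop n = b := by
  subst h; simp

-- the loop invariant: A's current joined string has the same length as B's fixed string and
-- agrees with it from the scan position on, so both loops find the same index at every step
lemma loop_eq (label_list : List String) (block_str : String) (L : Nat) (hL : 1 ≤ L)
    (hbs : block_str.toList.length = L) (s0 : List Char) :
    ∀ (fuel : Nat) (cl : List String) (eN : Nat) (acc : List (List String)),
      (∀ c ∈ cl, c.toList.length = 1) →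
      (PySem.Str.join "" cl).toList.length = s0.length →
      (PySem.Str.join "" cl).toList.drop eN = s0.drop eN →
      eN ≤ s0.length →
      extractBlocksLoopA label_list block_str L (List.replicate L " ") fuel cl (eN : Int) acc
        = extractBlocksLoopB label_list s0 block_str L fuel
            (PySem.Chars.findFrom s0 block_str.toList (eN : Int)) acc := by
  intro fuel
  induction fuel with
  | zero => intro cl eN acc _ _ _ _; rfl
  | succ fuel ih =>
    intro cl eN acc h1 hlen hdrop he
    have hfind : PySem.Chars.findFrom (PySem.Str.join "" cl).toList block_str.toList (eN : Int)
        = PySem.Chars.findFrom s0 block_str.toList (eN : Int) := by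
      rw [PySem.Chars.findFrom_natCast _ _ eN (by omega),
          PySem.Chars.findFrom_natCast _ _ eN he, hdrop]
    simp only [extractBlocksLoopA, extractBlocksLoopB, hfind]
    by_cases hneg : PySem.Chars.findFrom s0 block_str.toList (eN : Int) < 0
    · rw [if_pos hneg, if_neg (by omega)]
    · rw [if_neg hneg, if_pos (by omega)]
      obtain ⟨i, hidef⟩ : ∃ i, PySem.Chars.findFrom s0 block_str.toList (eN : Int) = i := ⟨_, rfl⟩
      rw [hidef]
      rw [hidef] at hneg
      have hspec := PySem.Chars.findFrom_natCast_spec s0 block_str.toList eN he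
        (by rw [hidef]; omega)
      rw [hidef] at hspec
      obtain ⟨hge, hpre, -⟩ := hspec
      have hiL : i.toNat + L ≤ s0.length := by
        have := hpre.length_le
        simp [hbs] at this
        omega
      have hi : i = ((i.toNat : Nat) : Int) := (Int.toNat_of_nonneg (by omega)).symm
      obtain ⟨iN, hiN⟩ : ∃ n : Nat, i = (n : Int) := ⟨i.toNat, hi⟩
      have hiNv : i.toNat = iN := by omega
      rw [hiNv] at hiL
      rw [hiNv] at hpre
      rw [hiN, ← Nat.cast_add]
      -- characterise A's spliced list on the character level
      have hmap1 : cl.map String.toList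
          = (PySem.Str.join "" cl).toList.map (fun c => [c]) := by
        rw [joinChars]; exact singletons_eq _ (by simpa using h1)
      have hjoin' : (PySem.Str.join ""
            (PySem.List.slice cl none (some (iN : Int)) ++ List.replicate L " " ++
             PySem.List.slice cl (some (((iN + L : Nat)) : Int)) none)).toList
          = (PySem.Str.join "" cl).toList.take iN ++ List.replicate L ' '
            ++ (PySem.Str.join "" cl).toList.drop (iN + L) := by
        rw [joinChars]
        rw [PySem.List.slice_to_natCast, PySem.List.slice_from_natCast]
        simp only [List.map_append, List.map_take, List.map_drop, List.map_replicate,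
          List.flatten_append, hmap1]
        have hsp : (" " : String).toList = [' '] := rfl
        rw [← List.map_take, ← List.map_drop, flatten_map_single, flatten_map_single]
        simp [hsp]
      have h1' : ∀ c ∈ (PySem.List.slice cl none (some (iN : Int)) ++ List.replicate L " " ++
             PySem.List.slice cl (some (((iN + L : Nat)) : Int)) none), c.toList.length = 1 := by
        intro c hc
        rw [PySem.List.slice_to_natCast, PySem.List.slice_from_natCast] at hc
        simp only [List.mem_append, List.mem_replicate] at hc
        rcases hc with (hc | hc) | hc
        · exact h1 c (List.mem_of_mem_take hc)
        · rw [hc.2]; rfl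
        · exact h1 c (List.mem_of_mem_drop hc)
      have htk : ((PySem.Str.join "" cl).toList.take iN).length = iN := by
        rw [List.length_take]; omega
      have hlen' : (PySem.Str.join ""
            (PySem.List.slice cl none (some (iN : Int)) ++ List.replicate L " " ++
             PySem.List.slice cl (some (((iN + L : Nat)) : Int)) none)).toList.length
          = s0.length := by
        rw [hjoin']
        simp only [List.length_append, List.length_replicate, List.length_drop, htk]
        omega
      have hdrop' : (PySem.Str.join ""
            (PySem.List.slice cl none (some (iN : Int)) ++ List.replicate L " " ++
             PySem.List.slice cl (some (((iN + L : Nat)) : Int)) none)).toList.drop (iN + L)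
          = s0.drop (iN + L) := by
        rw [hjoin', drop_len_append _ _ (iN + L)
          (by simp only [List.length_append, List.length_replicate, htk])]
        have hsum : eN + (iN + L - eN) = iN + L := by omega
        rw [← hsum, ← List.drop_drop, ← List.drop_drop, hdrop]
      exact ih _ (iN + L) _ h1' hlen' hdrop' hiL

-- ===== VERDICT (by name: the statement is the Claim_ definition above) =====
theorem extract_blocks_spec : Claim_equal_extract_blocks := by
  intro label_list ctype_list block_str _ hpre
  obtain ⟨hbs, h1 | hnot⟩ := hpre
  case inr =>
    -- block_str does not occur in the joined types: both loops stop at the first find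
    unfold Spec_extract_blocks extract_blocks extract_blocks_alt
    have hf : PySem.Chars.find (PySem.Str.join "" ctype_list).toList block_str.toList = -1 :=
      (PySem.Chars.find_eq_neg_one_iff _ _).mpr hnot
    simp only [extractBlocksLoopA, extractBlocksLoopB, PySem.Chars.findFrom_zero, hf]
    norm_num
  unfold Spec_extract_blocks extract_blocks extract_blocks_alt
  have hL : 1 ≤ block_str.toList.length := by
    cases h : block_str.toList with
    | nil => exact absurd h hbs
    | cons _ _ => simp
  have := loop_eq label_list block_str block_str.toList.length hL rfl
    (PySem.Str.join "" ctype_list).toList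
    ((PySem.Str.join "" ctype_list).toList.length + ctype_list.length + 1)
    ctype_list 0 [] h1 rfl rfl (by omega)
  rw [show ((0 : Nat) : Int) = (0 : Int) from rfl] at this
  rw [this, PySem.Chars.findFrom_zero]
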